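-- pv_equiv track=rewrite | github.com/soyukke/lean-unsolved | scripts/Tk_inverse_tree_closed_form.py | syracuse_preimages
-- ===== SOURCE A (Python) =====
-- def v2(n):
--     """2-adic valuation"""
--     if n == 0:
--         return 0
--     count = 0
--     while n % 2 == 0:
--         n //= 2
--         count += 1
--     return count
--
-- def syracuse(n):
--     """Syracuse function for odd n"""
--     m = 3 * n + 1
--     return m >> v2(m)
--
-- def syracuse_preimages(m, N_max=None):
--     """
--     Return all odd n such that syracuse(n) = m.
--     If N_max given, restrict to n <= N_max.
--
--     n = (m * 2^j - 1) / 3 for valid j values.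
--     """
--     preimages = []
--     if m % 3 == 0:
--         return preimages  # No preimages if m divisible by 3
--
--     j = 1
--     while True:
--         numerator = m * (1 << j) - 1
--         if numerator % 3 != 0:
--             j += 1
--             continue
--         n = numerator // 3
--         if N_max and n > N_max:
--             break
--         if n % 2 == 1 and n >= 1:
--             # Verify
--             assert syracuse(n) == m, f"Failed: syracuse({n}) != {m}"
--             preimages.append(n)
--         j += 1
--         if j > 200:  # Safety bound
--             break
--     return preimages
-- ===== SOURCE B (Python) =====
-- def syracuse_preimages(m, N_max=None):
--     # Odd preimages exist only for positive odd m not divisible by 3.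
--     if m < 1 or m % 3 == 0 or m % 2 == 0:
--         return []
--     # exponent parity is fixed by m mod 3; successive preimages obey n -> 4n+1
--     j = 1 if m % 3 == 2 else 2
--     n = (m * (1 << j) - 1) // 3
--     out = []
--     while j <= 201 and not (N_max and n > N_max):
--         out.append(n)
--         n = 4 * n + 1
--         j += 2
--     return out
-- ===== Notes on version B (the rewrite author's own statement) =====
-- stated objective: simpler
-- what changed: B picks the starting exponent by m mod 3 and generates the preimages directly with the recurrence n -> 4n+1, instead of scanning every exponent j and filtering by divisibility; the divisibility test, continue, power recomputation, division, oddness check and assert all disappear.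
import Mathlib
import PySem

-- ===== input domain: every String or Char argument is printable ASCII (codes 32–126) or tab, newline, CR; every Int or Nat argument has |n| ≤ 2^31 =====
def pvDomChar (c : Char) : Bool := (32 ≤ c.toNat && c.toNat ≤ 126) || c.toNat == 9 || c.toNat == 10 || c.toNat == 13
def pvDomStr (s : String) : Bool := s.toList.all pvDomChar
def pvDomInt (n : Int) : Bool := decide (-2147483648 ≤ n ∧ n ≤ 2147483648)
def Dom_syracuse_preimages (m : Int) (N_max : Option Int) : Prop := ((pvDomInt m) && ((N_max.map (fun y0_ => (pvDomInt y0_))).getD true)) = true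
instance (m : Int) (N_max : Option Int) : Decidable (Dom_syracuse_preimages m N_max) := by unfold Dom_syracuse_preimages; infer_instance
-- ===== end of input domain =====

-- B generates the preimages directly (start exponent from m mod 3, recurrence n -> 4n+1)
-- instead of A's scan over all exponents with a divisibility filter; return values agree on Pre_.


-- ===== PORT A =====
-- A's `while True` loop, fuel-bounded: once m % 3 ≠ 0 the loop runs at most 201 iterations
-- (the `j > 200` break), so fuel 500 is never exhausted.  `N_max and n > N_max` is the
-- truthiness test: none and some 0 are falsy, hence `N_max.getD 0 ≠ 0 ∧ …`.
-- The `assert` is not ported: on every input admitted by Pre_ it passes.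
def syrLoopA (m : Int) (N_max : Option Int) : Nat → Nat → List Int → List Int
  | 0, _, acc => acc
  | fuel+1, j, acc =>
    let numerator := m * 2 ^ j - 1
    if numerator % 3 ≠ 0 then
      syrLoopA m N_max fuel (j+1) acc
    else
      let n := PySem.Int.floordiv numerator 3
      if N_max.getD 0 ≠ 0 ∧ N_max.getD 0 < n then acc
      else
        let acc' := if n % 2 = 1 ∧ 1 ≤ n then acc ++ [n] else acc
        if 200 < j + 1 then acc' else syrLoopA m N_max fuel (j+1) acc'

def syracuse_preimages (m : Int) (N_max : Option Int) : List Int :=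
  if m % 3 = 0 then [] else syrLoopA m N_max 500 1 []

-- ===== PORT B =====
-- Source B's while loop, fuel-bounded (at most 101 iterations; fuel 300 is never exhausted).
def syrLoopB (N_max : Option Int) : Nat → Nat → Int → List Int → List Int
  | 0, _, _, acc => acc
  | fuel+1, j, n, acc =>
    if j ≤ 201 ∧ ¬(N_max.getD 0 ≠ 0 ∧ N_max.getD 0 < n) then
      syrLoopB N_max fuel (j+2) (4*n+1) (acc ++ [n])
    else acc

def syracuse_preimages_alt (m : Int) (N_max : Option Int) : List Int :=
  if m < 1 ∨ m % 3 = 0 ∨ m % 2 = 0 then []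
  else
    syrLoopB N_max 300 (if m % 3 = 2 then (1:Nat) else 2)
      (PySem.Int.floordiv (m * 2 ^ (if m % 3 = 2 then (1:Nat) else 2) - 1) 3) []

-- ===== PRECONDITION & SPEC =====
-- the first candidate n A computes (at exponent 1 if m % 3 = 2, else at exponent 2)
def pvFirst (m : Int) : Int :=
  PySem.Int.floordiv (m * 2 ^ (if m % 3 = 2 then (1:Nat) else 2) - 1) 3

-- Pre_ excludes exactly the inputs where A raises AssertionError (its self-check
-- `assert syracuse(n) == m` fails): positive even m with m % 3 ≠ 0, unless a truthy
-- N_max breaks the loop before the first candidate is checked.  On those inputs B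
-- returns [] (correct: the Syracuse function only produces odd values), so they are excluded.
def Pre_syracuse_preimages (m : Int) (N_max : Option Int) : Prop :=
  ¬ (0 < m ∧ m % 2 = 0 ∧ m % 3 ≠ 0 ∧ (N_max.getD 0 = 0 ∨ pvFirst m ≤ N_max.getD 0))
instance (m : Int) (N_max : Option Int) : Decidable (Pre_syracuse_preimages m N_max) := by
  unfold Pre_syracuse_preimages; infer_instance

def pvWitness_syracuse_preimages : Int × Option Int := (5, none)

def Spec_syracuse_preimages (m : Int) (N_max : Option Int) (out : List Int) : Prop := out = syracuse_preimages_alt m N_max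
instance (m : Int) (N_max : Option Int) (out : List Int) : Decidable (Spec_syracuse_preimages m N_max out) := by unfold Spec_syracuse_preimages; infer_instance

-- ===== CLAIM (what is proved, stated in full; the proofs are below) =====
def Claim_equal_syracuse_preimages : Prop := ∀ (m : Int) (N_max : Option Int), Dom_syracuse_preimages m N_max → Pre_syracuse_preimages m N_max → Spec_syracuse_preimages m N_max (syracuse_preimages m N_max)

-- ===== LEMMAS AND PROOFS =====

lemma floordiv_three_exact (n : Int) : PySem.Int.floordiv (3 * n) 3 = n := by
  rw [PySem.Int.floordiv_eq_iff_of_pos (by norm_num)]; omega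

-- for m ≤ 0 the candidate n is never ≥ 1, so A's loop appends nothing
lemma loopA_nonpos (m : Int) (N : Option Int) (hm : m ≤ 0) :
    ∀ (fa j : Nat) (acc : List Int), syrLoopA m N fa j acc = acc := by
  intro fa
  induction fa with
  | zero => intro j acc; rfl
  | succ fa ih =>
    intro j acc
    simp only [syrLoopA]
    by_cases h3 : (m * 2 ^ j - 1) % 3 ≠ 0
    · rw [if_pos h3]; exact ih _ _
    · rw [if_neg h3]
      have hnum : m * 2 ^ j - 1 < 3 := by
        have : m * 2 ^ j ≤ 0 := mul_nonpos_of_nonpos_of_nonneg hm (by positivity)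
        omega
      have hn : PySem.Int.floordiv (m * 2 ^ j - 1) 3 < 1 := by
        rw [PySem.Int.floordiv_lt_iff_lt_mul (by norm_num)]; omega
      by_cases hb : N.getD 0 ≠ 0 ∧ N.getD 0 < PySem.Int.floordiv (m * 2 ^ j - 1) 3
      · rw [if_pos hb]
      · rw [if_neg hb,
          if_neg (show ¬(PySem.Int.floordiv (m * 2 ^ j - 1) 3 % 2 = 1 ∧
            1 ≤ PySem.Int.floordiv (m * 2 ^ j - 1) 3) by omega)]
        by_cases hj : 200 < j + 1
        · rw [if_pos hj]
        · rw [if_neg hj]; exact ih _ _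

-- B's loop returns immediately once j > 201, whatever the fuel
lemma loopB_done (N : Option Int) (fb j : Nat) (n : Int) (acc : List Int) (hj : 201 < j) :
    syrLoopB N fb j n acc = acc := by
  cases fb with
  | zero => rfl
  | succ fb => simp only [syrLoopB]; rw [if_neg (by omega)]

-- one non-matching exponent of A's scan is skipped
lemma loopA_skip (m : Int) (N : Option Int) (fa j : Nat) (acc : List Int)
    (h : (m * 2 ^ j - 1) % 3 ≠ 0) :
    syrLoopA m N (fa + 1) j acc = syrLoopA m N fa (j + 1) acc := by
  simp only [syrLoopA]; rw [if_pos h]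

-- A's loop breaks before appending when the candidate exceeds a truthy N_max
lemma loopA_break (m : Int) (N : Option Int) (fa j : Nat) (acc : List Int)
    (h0 : (m * 2 ^ j - 1) % 3 = 0)
    (hb : N.getD 0 ≠ 0 ∧ N.getD 0 < PySem.Int.floordiv (m * 2 ^ j - 1) 3) :
    syrLoopA m N (fa + 1) j acc = acc := by
  simp only [syrLoopA]; rw [if_neg (not_not_intro h0), if_pos hb]

-- main loop correspondence on the matching exponents: A's scan = B's 4n+1 recurrence
lemma loop_eq (m : Int) (N : Option Int) (hm : 1 ≤ m) :
    ∀ (fb fa j : Nat) (n : Int) (acc : List Int),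
      1 ≤ j → j ≤ 201 → 3 * n + 1 = m * 2 ^ j →
      202 - j ≤ fb → 2 * (202 - j) ≤ fa →
      syrLoopA m N fa j acc = syrLoopB N fb j n acc := by
  intro fb
  induction fb with
  | zero => intro fa j n acc hj1 hj2 _ hfb _; omega
  | succ fb ih =>
    intro fa j n acc hj1 hj2 hinv hfb hfa
    obtain ⟨fa1, rfl⟩ : ∃ fa1, fa = fa1 + 1 := ⟨fa - 1, by omega⟩
    have hnum : m * 2 ^ j - 1 = 3 * n := by omega
    -- n is odd and ≥ 1: 3n + 1 = m * 2^j = (m * 2^(j-1)) * 2 with the factor ≥ 1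
    have hsplit : (2:Int) ^ j = 2 ^ (j - 1) * 2 := by
      rw [← pow_succ]; congr 1; omega
    have h1 : (1:Int) ≤ 2 ^ (j - 1) := one_le_pow₀ (by norm_num)
    have hfac : 1 ≤ m * 2 ^ (j - 1) := by nlinarith
    have h2t : 3 * n + 1 = 2 * (m * 2 ^ (j - 1)) := by rw [hinv, hsplit]; ring
    have hodd : n % 2 = 1 ∧ 1 ≤ n := by omega
    simp only [syrLoopA, syrLoopB]
    rw [hnum, if_neg (by omega), floordiv_three_exact]
    by_cases hb : N.getD 0 ≠ 0 ∧ N.getD 0 < n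
    · rw [if_pos hb, if_neg (by tauto)]
    · rw [if_neg hb, if_pos (⟨by omega, hb⟩ :
        j ≤ 201 ∧ ¬(N.getD 0 ≠ 0 ∧ N.getD 0 < n)), if_pos hodd]
      by_cases hend : 200 < j + 1
      · rw [if_pos hend, loopB_done _ _ _ _ _ (by omega)]
      · rw [if_neg hend]
        -- A's next exponent j+1 has the wrong parity: numerator ≡ 1 (mod 3)
        obtain ⟨fa2, rfl⟩ : ∃ fa2, fa1 = fa2 + 1 := ⟨fa1 - 1, by omega⟩
        have hnum1 : m * 2 ^ (j + 1) - 1 = 6 * n + 1 := by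
          have : m * 2 ^ (j + 1) = (3 * n + 1) * 2 := by rw [hinv]; ring
          omega
        simp only [syrLoopA]
        rw [hnum1, if_pos (by omega)]
        have hinv2 : 3 * (4 * n + 1) + 1 = m * 2 ^ (j + 2) := by
          have : m * 2 ^ (j + 2) = (3 * n + 1) * 4 := by rw [hinv]; ring
          omega
        exact ih fa2 (j + 2) (4 * n + 1) (acc ++ [n]) (by omega) (by omega) hinv2
          (by omega) (by omega)

-- ===== VERDICT (by name: the statement is the Claim_ definition above) =====
theorem syracuse_preimages_spec : Claim_equal_syracuse_preimages := by
  intro m N _ hpre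
  unfold Spec_syracuse_preimages syracuse_preimages syracuse_preimages_alt
  by_cases h3 : m % 3 = 0
  · rw [if_pos h3, if_pos (by tauto)]
  · rw [if_neg h3]
    by_cases hm : m < 1
    · rw [if_pos (by tauto)]
      exact loopA_nonpos m N (by omega) 500 1 []
    · have hm1 : 1 ≤ m := by omega
      have h3' : m % 3 = 1 ∨ m % 3 = 2 := by omega
      by_cases he : m % 2 = 0
      · -- A breaks on the first candidate (that is what Pre_ guarantees for even m);
        -- B returns [] because m is even
        rw [if_pos (by tauto)]
        have hbrk : N.getD 0 ≠ 0 ∧ N.getD 0 < pvFirst m := by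
          unfold Pre_syracuse_preimages at hpre
          by_contra hc
          exact hpre ⟨by omega, he, h3, by omega⟩
        rcases h3' with h31 | h32
        · -- exponent 1 mismatches, exponent 2 is the first candidate
          have hp : pvFirst m = PySem.Int.floordiv (m * 2 ^ (2:Nat) - 1) 3 := by
            unfold pvFirst; rw [if_neg (by omega)]
          rw [hp] at hbrk
          show syrLoopA m N (499 + 1) 1 [] = []
          rw [loopA_skip m N 499 1 [] (by norm_num; omega)]
          show syrLoopA m N (498 + 1) 2 [] = []
          exact loopA_break m N 498 2 [] (by norm_num; omega) hbrk
        · have hp : pvFirst m = PySem.Int.floordiv (m * 2 ^ (1:Nat) - 1) 3 := by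
            unfold pvFirst; rw [if_pos h32]
          rw [hp] at hbrk
          show syrLoopA m N (499 + 1) 1 [] = []
          exact loopA_break m N 499 1 [] (by norm_num; omega) hbrk
      · -- main case: m ≥ 1, odd, m % 3 ∈ {1,2}
        rw [if_neg (by push Not; exact ⟨hm1, h3, he⟩)]
        rcases h3' with h31 | h32
        · rw [if_neg (by omega)]
          obtain ⟨k, hk⟩ : ∃ k : Int, m * 2 ^ (2:Nat) - 1 = 3 * k :=
            ⟨(m * 4 - 1) / 3, by norm_num; omega⟩
          rw [hk, floordiv_three_exact]
          show syrLoopA m N (499 + 1) 1 [] = syrLoopB N 300 2 k []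
          rw [loopA_skip m N 499 1 [] (by norm_num; omega)]
          exact loop_eq m N hm1 300 499 2 k [] (by omega) (by omega) (by omega)
            (by omega) (by omega)
        · rw [if_pos h32]
          obtain ⟨k, hk⟩ : ∃ k : Int, m * 2 ^ (1:Nat) - 1 = 3 * k :=
            ⟨(m * 2 - 1) / 3, by norm_num; omega⟩
          rw [hk, floordiv_three_exact]
          exact loop_eq m N hm1 300 500 1 k [] (by omega) (by omega) (by omega)
            (by omega) (by omega)
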